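-- pv_equiv track=rewrite | github.com/dvdknaap/destinyVespersHostPuzzle | puzzle.py | find_unique_combination
-- ===== SOURCE A (Python) =====
-- import itertools
--
-- def find_unique_combination(target, operation='sum'):
--     """
--     Find a set of four unique digits between 1 and 9 that reach the target
--     using the specified operation ('sum' or 'multiply').
--     """
--     digits = range(1, 10)
--     # Generate all possible combinations of four unique digits
--     combinations = itertools.permutations(digits, 4)
--
--     # Find the correct combination based on the operation
--     for comb in combinations:
--         if operation == 'sum' and sum(comb) == target:
--             return comb
--         elif operation == 'multiply':
--             product = comb[0] * comb[1] * comb[2] * comb[3]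
--             if product == target:
--                 return comb
--
--     return None
-- ===== SOURCE B (Python) =====
-- def find_unique_combination(target, operation='sum'):
--     """
--     Find a set of four unique digits between 1 and 9 that reach the target
--     using the specified operation ('sum' or 'multiply').
--     """
--     # Recursive backtracking over strictly increasing digit choices: the first
--     # matching permutation in A's lex scan is always the increasing one, so the
--     # depth-first increasing search returns the identical tuple.
--     if operation == 'sum':
--         combine, start_value = (lambda x, y: x + y), 0
--     elif operation == 'multiply':
--         combine, start_value = (lambda x, y: x * y), 1
--     else:
--         return None
--
--     def search(k, start, acc, chosen):
--         if k == 0: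
--             return tuple(chosen) if acc == target else None
--         for d in range(start, 10):
--             found = search(k - 1, d + 1, combine(acc, d), chosen + [d])
--             if found is not None:
--                 return found
--         return None
--
--     return search(4, 1, start_value, [])
-- ===== Notes on version B (the rewrite author's own statement) =====
-- stated objective: faster
-- what changed: Replaces the scan over all 3024 permutations of 4 distinct digits with a recursive depth-first backtracking search that picks strictly increasing digits (126 candidates), folding the sum/product into an accumulator as it goes; the first matching permutation in A's lex scan is always the increasing tuple, so the first match is identical.
import Mathlib
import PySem

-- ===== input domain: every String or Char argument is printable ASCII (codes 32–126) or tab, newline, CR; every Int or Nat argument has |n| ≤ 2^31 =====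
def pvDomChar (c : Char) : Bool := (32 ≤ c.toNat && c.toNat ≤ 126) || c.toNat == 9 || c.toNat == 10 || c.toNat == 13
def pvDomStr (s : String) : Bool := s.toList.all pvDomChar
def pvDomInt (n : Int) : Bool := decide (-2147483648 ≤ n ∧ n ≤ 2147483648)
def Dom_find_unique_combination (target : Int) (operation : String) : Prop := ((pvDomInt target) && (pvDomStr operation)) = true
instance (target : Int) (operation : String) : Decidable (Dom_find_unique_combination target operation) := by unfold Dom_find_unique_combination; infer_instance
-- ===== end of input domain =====

-- B replaces A's scan of all 3024 permutations by a recursive depth-first backtracking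
-- search over strictly increasing digits (126 candidates, accumulator folded in);
-- the first match is identical because A's lex-first matching permutation is increasing.

-- ===== PORT A =====
-- digits = range(1, 10)
def pvDigitsA : List Int := PySem.List.pyRange 1 10 1

-- itertools.permutations(digits, 4) in its documented lex order (distinct input):
-- pick a, then b from the rest, then c, then d.
def pvPermsA : List (Int × Int × Int × Int) :=
  pvDigitsA.flatMap (fun a =>
    (pvDigitsA.erase a).flatMap (fun b =>
      ((pvDigitsA.erase a).erase b).flatMap (fun c =>
        (((pvDigitsA.erase a).erase b).erase c).map (fun d => (a, b, c, d)))))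

-- the loop: return the first comb matching the if/elif chain, else None
def find_unique_combination (target : Int) (operation : String) : Option (Int × Int × Int × Int) :=
  pvPermsA.find? (fun t =>
    (operation == "sum" && (t.1 + t.2.1 + t.2.2.1 + t.2.2.2 == target)) ||
    (operation == "multiply" && (t.1 * t.2.1 * t.2.2.1 * t.2.2.2 == target)))

-- ===== PORT B =====
-- Source B's inner `search(k, start, acc, chosen)`: pick k more digits, each from
-- range(start, 10), folding each into acc with `combine`; the for-loop with early
-- return on the first non-None result is List.findSome?.
def pvSearchB (target : Int) (combine : Int → Int → Int) :
    Nat → Int → Int → List Int → Option (Int × Int × Int × Int)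
  | 0, _, acc, chosen =>
      -- return tuple(chosen) if acc == target else None  (chosen has 4 elements here)
      if acc == target then
        match chosen with
        | [a, b, c, d] => some (a, b, c, d)
        | _ => none
      else none
  | k + 1, start, acc, chosen =>
      (PySem.List.pyRange start 10 1).findSome?
        (fun d => pvSearchB target combine k (d + 1) (combine acc d) (chosen ++ [d]))

def find_unique_combination_alt (target : Int) (operation : String) : Option (Int × Int × Int × Int) :=
  if operation == "sum" then pvSearchB target (fun x y => x + y) 4 1 0 []
  else if operation == "multiply" then pvSearchB target (fun x y => x * y) 4 1 1 []
  else none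

-- ===== PRECONDITION & SPEC =====
def Spec_find_unique_combination (target : Int) (operation : String) (out : Option (Int × Int × Int × Int)) : Prop := out = find_unique_combination_alt target operation
instance (target : Int) (operation : String) (out : Option (Int × Int × Int × Int)) : Decidable (Spec_find_unique_combination target operation out) := by unfold Spec_find_unique_combination; infer_instance

-- ===== CLAIM (what is proved, stated in full; the proofs are below) =====
def Claim_equal_find_unique_combination : Prop := ∀ (target : Int) (operation : String), Dom_find_unique_combination target operation → Spec_find_unique_combination target operation (find_unique_combination target operation)

-- ===== LEMMAS AND PROOFS =====

-- proof-side intermediate: the increasing 4-tuples in B's search order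
def pvCombosB : List (Int × Int × Int × Int) :=
  (PySem.List.pyRange 1 10 1).flatMap (fun a =>
    (PySem.List.pyRange (a + 1) 10 1).flatMap (fun b =>
      (PySem.List.pyRange (b + 1) 10 1).flatMap (fun c =>
        (PySem.List.pyRange (c + 1) 10 1).map (fun d => (a, b, c, d)))))

-- pointwise-equal functions scan the same
theorem pvFindSome?_ext {α β : Type} (f g : α → Option β) (l : List α)
    (h : ∀ x, f x = g x) : l.findSome? f = l.findSome? g := by
  rw [funext h]

theorem pvFind?_ext {α : Type} (p q : α → Bool) (l : List α)
    (h : ∀ x, p x = q x) : l.find? p = l.find? q := by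
  rw [funext h]

-- findSome? of a guarded some is find?-then-map
theorem pvFindSome?_guard {α β : Type} (l : List α) (p : α → Bool) (g : α → β) :
    (l.findSome? (fun d => if p d then some (g d) else none)) = (l.find? p).map g := by
  induction l with
  | nil => rfl
  | cons x xs ih =>
    simp only [List.findSome?_cons, List.find?_cons]
    by_cases h : p x = true
    · simp [h]
    · simp [h, ih]

-- B's search over the start digit, unfolded to find? over pvCombosB
theorem pvSearchB_eq_find? (target : Int) (combine : Int → Int → Int) (acc0 : Int) :
    pvSearchB target combine 4 1 acc0 [] =
      pvCombosB.find? (fun t =>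
        combine (combine (combine (combine acc0 t.1) t.2.1) t.2.2.1) t.2.2.2 == target) := by
  simp only [pvCombosB, List.find?_flatMap, List.find?_map]
  simp only [pvSearchB, List.nil_append, List.cons_append]
  refine pvFindSome?_ext _ _ _ (fun a => ?_)
  refine pvFindSome?_ext _ _ _ (fun b => ?_)
  refine pvFindSome?_ext _ _ _ (fun c => ?_)
  rw [pvFindSome?_guard]
  rfl

-- keep only the first pair carrying each key (first-occurrence dedup),
-- structural recursion with an accumulator of keys already seen
def pvDk (seen : List Int) :
    List (Int × (Int × Int × Int × Int)) → List (Int × (Int × Int × Int × Int))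
  | [] => []
  | (k, v) :: t => if seen.contains k then pvDk seen t else (k, v) :: pvDk (k :: seen) t

-- dedup preserves lookup of any key not yet seen
theorem pvLookup_dk (x : Int) (l : List (Int × (Int × Int × Int × Int))) :
    ∀ (seen : List Int), (∀ k ∈ seen, (x == k) = false) →
      List.lookup x (pvDk seen l) = List.lookup x l := by
  induction l with
  | nil => intro seen _; rfl
  | cons p t ih =>
    intro seen h
    obtain ⟨k, v⟩ := p
    simp only [pvDk, List.lookup]
    by_cases hc : seen.contains k = true
    · rw [if_pos hc]
      have hxk : (x == k) = false := h k (List.mem_of_elem_eq_true hc)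
      rw [hxk]
      exact ih seen h
    · rw [if_neg hc]
      simp only [List.lookup]
      cases hxk : (x == k) with
      | true => rfl
      | false =>
        exact ih (k :: seen) (by
          intro k' hk'
          rcases List.mem_cons.mp hk' with rfl | hk'
          · exact hxk
          · exact h k' hk')

-- find? by key equals lookup in the key-indexed association list
theorem pvFind?_eq_lookup (key : (Int × Int × Int × Int) → Int) (target : Int)
    (l : List (Int × Int × Int × Int)) :
    l.find? (fun t => key t == target) =
      List.lookup target (l.map (fun t => (key t, t))) := by
  induction l with
  | nil => rfl
  | cons t ts ih =>
    rw [List.map_cons, List.find?_cons]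
    simp only [List.lookup]
    have hsym : (target == key t) = (key t == target) := by
      cases h : (key t == target) with
      | true => simp [eq_of_beq h]
      | false => exact beq_eq_false_iff_ne.mpr (Ne.symm (by simpa using h))
    rw [hsym]
    cases h : (key t == target) with
    | true => rfl
    | false => exact ih

-- the concrete dedup tables agree: the first permutation achieving each sum /
-- product is exactly the increasing tuple, in the order B's search produces them
set_option maxRecDepth 40000 in
set_option maxHeartbeats 2000000 in
theorem pvDkSum_eq :
    pvDk [] (pvPermsA.map (fun t => (t.1 + t.2.1 + t.2.2.1 + t.2.2.2, t))) =
    pvDk [] (pvCombosB.map (fun t => (t.1 + t.2.1 + t.2.2.1 + t.2.2.2, t))) := by decide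

set_option maxRecDepth 40000 in
set_option maxHeartbeats 2000000 in
theorem pvDkMul_eq :
    pvDk [] (pvPermsA.map (fun t => (t.1 * t.2.1 * t.2.2.1 * t.2.2.2, t))) =
    pvDk [] (pvCombosB.map (fun t => (t.1 * t.2.1 * t.2.2.1 * t.2.2.2, t))) := by decide

-- for one key function, the two scans return the same first match
theorem pvFind?_key_eq (key : (Int × Int × Int × Int) → Int) (target : Int)
    (hdk : pvDk [] (pvPermsA.map (fun t => (key t, t))) =
           pvDk [] (pvCombosB.map (fun t => (key t, t)))) :
    pvPermsA.find? (fun t => key t == target) =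
    pvCombosB.find? (fun t => key t == target) := by
  rw [pvFind?_eq_lookup, pvFind?_eq_lookup,
      ← pvLookup_dk target (pvPermsA.map (fun t => (key t, t))) [] (by simp),
      ← pvLookup_dk target (pvCombosB.map (fun t => (key t, t))) [] (by simp), hdk]

-- ===== VERDICT (by name: the statement is the Claim_ definition above) =====
theorem find_unique_combination_spec : Claim_equal_find_unique_combination := by
  intro target operation _
  unfold Spec_find_unique_combination find_unique_combination find_unique_combination_alt
  by_cases hs : operation = "sum"
  · subst hs
    rw [if_pos (by decide), pvSearchB_eq_find?]
    have hfun : (fun t : Int × Int × Int × Int =>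
        (("sum" : String) == "sum" && (t.1 + t.2.1 + t.2.2.1 + t.2.2.2 == target)) ||
        (("sum" : String) == "multiply" && (t.1 * t.2.1 * t.2.2.1 * t.2.2.2 == target)))
        = fun t => t.1 + t.2.1 + t.2.2.1 + t.2.2.2 == target := by
      funext t
      rw [show (("sum" : String) == "sum") = true from by decide,
          show (("sum" : String) == "multiply") = false from by decide]
      simp
    rw [hfun]
    have := pvFind?_key_eq (fun t => t.1 + t.2.1 + t.2.2.1 + t.2.2.2) target pvDkSum_eq
    rw [this]
    refine pvFind?_ext _ _ _ (fun t => ?_)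
    simp only []
    rw [show (0 : Int) + t.1 + t.2.1 + t.2.2.1 + t.2.2.2 = t.1 + t.2.1 + t.2.2.1 + t.2.2.2 from by ring]
  · by_cases hm : operation = "multiply"
    · subst hm
      rw [if_neg (by decide), if_pos (by decide), pvSearchB_eq_find?]
      have hfun : (fun t : Int × Int × Int × Int =>
          (("multiply" : String) == "sum" && (t.1 + t.2.1 + t.2.2.1 + t.2.2.2 == target)) ||
          (("multiply" : String) == "multiply" && (t.1 * t.2.1 * t.2.2.1 * t.2.2.2 == target)))
          = fun t => t.1 * t.2.1 * t.2.2.1 * t.2.2.2 == target := by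
        funext t
        rw [show (("multiply" : String) == "sum") = false from by decide,
            show (("multiply" : String) == "multiply") = true from by decide]
        simp
      rw [hfun]
      have := pvFind?_key_eq (fun t => t.1 * t.2.1 * t.2.2.1 * t.2.2.2) target pvDkMul_eq
      rw [this]
      refine pvFind?_ext _ _ _ (fun t => ?_)
      simp only []
      rw [show (1 : Int) * t.1 * t.2.1 * t.2.2.1 * t.2.2.2 = t.1 * t.2.1 * t.2.2.1 * t.2.2.2 from by ring]
    · have h1 : (operation == "sum") = false := beq_eq_false_iff_ne.mpr hs
      have h2 : (operation == "multiply") = false := beq_eq_false_iff_ne.mpr hm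
      rw [if_neg (by simpa using hs), if_neg (by simpa using hm),
          List.find?_eq_none.mpr (by intro x _; simp [h1, h2])]
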